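-- pv_equiv track=rewrite | github.com/84zume/AtCoder | contests/src/abc228/abc228_d/main.py | solve
-- ===== SOURCE A (Python) =====
-- def solve(Q, t, x, h):
--     A = [-1] * (2**20+1)
--     result = []
--     for i in range(Q):
--         if t[i] == 1:
--             index = x[i]
--             while A[index] != -1:
--                 index += 1
--             A[index] = h[i]
--         else:
--             index = x[i]
--             result.append(A[index])
--
--     return result
-- ===== SOURCE B (Python) =====
-- def solve(Q, t, x, h):
--     # Union-find "next free slot" with path compression over a dict of filled
--     # cells; avoids A's 2**20+1 array and its linear forward scans.
--     val = {}   # filled slot -> stored value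
--     nxt = {}   # filled slot -> a later slot; chasing it reaches the first free slot
--     result = []
--     for i in range(Q):
--         if t[i] == 1:
--             s = x[i]
--             path = []
--             while s in nxt:
--                 path.append(s)
--                 s = nxt[s]
--             for p in path:          # path compression
--                 nxt[p] = s
--             val[s] = h[i]
--             nxt[s] = s + 1
--         else:
--             result.append(val.get(x[i], -1))
--     return result
-- ===== Notes on version B (the rewrite author's own statement) =====
-- stated objective: alternative
-- what changed: B replaces A's 2**20+1-cell array (allocated per call) and its cell-by-cell forward scan for a free slot by a dict of filled cells plus a union-find 'next free slot' pointer dict with path compression, so a free slot is found by chasing (and then shortcutting) pointers instead of scanning occupied cells one by one.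
-- outside the precondition, e.g. on solve(2, [1, 2], [1048576, -1], [5, 0]): A returns [5], B returns [-1]; on solve(3, [1, 1, 2], [0, 0, 0], [-1, 5, 9]): A returns [5], B returns [-1]; on solve(2, [1, 1], [0, 1048576], [5, 6]): A returns [], B returns []
import Mathlib
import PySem

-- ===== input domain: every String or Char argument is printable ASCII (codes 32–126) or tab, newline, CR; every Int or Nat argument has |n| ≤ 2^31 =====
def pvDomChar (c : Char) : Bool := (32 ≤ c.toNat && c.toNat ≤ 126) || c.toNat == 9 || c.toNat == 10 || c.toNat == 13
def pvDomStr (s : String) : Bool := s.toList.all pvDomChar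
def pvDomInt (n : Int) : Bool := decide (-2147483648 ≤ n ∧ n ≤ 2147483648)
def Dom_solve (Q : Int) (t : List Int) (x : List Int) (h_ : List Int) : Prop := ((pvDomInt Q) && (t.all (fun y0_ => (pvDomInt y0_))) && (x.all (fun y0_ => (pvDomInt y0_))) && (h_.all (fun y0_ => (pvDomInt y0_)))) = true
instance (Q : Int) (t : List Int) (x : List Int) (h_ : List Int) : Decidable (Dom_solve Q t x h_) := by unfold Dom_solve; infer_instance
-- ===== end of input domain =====

-- B replaces A's 2**20+1-cell scan array by a dict of filled cells plus a
-- union-find "next free slot" pointer dict with path compression (alternative algorithm).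

-- ===== PORT A =====
-- Python's list A (2**20+1 cells) is ported as Array Int.  pyAGet/pyASet are Python's
-- indexing with negative wrap-around; an out-of-range access is an IndexError in Python
-- (excluded by Pre_): there pyAGet returns the default and pyASet leaves the array unchanged.
def pyAGet (A : Array Int) (i : Int) (d : Int) : Int :=
  let j := if i < 0 then i + A.size else i
  (A[j.toNat]?).getD d

def pyASet (A : Array Int) (i : Int) (v : Int) : Array Int :=
  let j := if i < 0 then i + A.size else i
  A.setIfInBounds j.toNat v

-- 'while A[index] != -1: index += 1' (fuel makes the loop structural; fuel = array size,
-- ample under Pre_, which guarantees a free cell is reached before the array's end)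
def solveScan (A : Array Int) : Nat → Int → Int
  | 0, index => index
  | fuel+1, index => if pyAGet A index (-1) ≠ -1 then solveScan A fuel (index + 1) else index

def solveStepA (t x h_ : List Int) (st : Array Int × List Int) (i : Int) : Array Int × List Int :=
  if PySem.List.pyGetD t i 0 = 1 then
    let index := solveScan st.1 st.1.size (PySem.List.pyGetD x i 0)
    (pyASet st.1 index (PySem.List.pyGetD h_ i 0), st.2)
  else
    (st.1, st.2 ++ [pyAGet st.1 (PySem.List.pyGetD x i 0) 0])

def solve (Q : Int) (t : List Int) (x : List Int) (h_ : List Int) : List Int :=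
  ((PySem.List.pyRange 0 Q 1).foldl (solveStepA t x h_) (Array.replicate 1048577 (-1), [])).2

-- ===== PORT B =====
-- 'while s in nxt: path.append(s); s = nxt[s]'  (fuel makes the loop structural;
-- fuel = len(nxt)+1 suffices: the chain visits distinct keys of nxt)
def chaseB (nxt : PySem.Dict Int Int) : Nat → Int → List Int × Int
  | 0, s => ([], s)
  | fuel+1, s =>
    match nxt.get? s with
    | none => ([], s)
    | some j =>
      let r := chaseB nxt fuel j
      (s :: r.1, r.2)

def solveStepB (t x h_ : List Int) (st : (PySem.Dict Int Int × PySem.Dict Int Int) × List Int)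
    (i : Int) : (PySem.Dict Int Int × PySem.Dict Int Int) × List Int :=
  let val := st.1.1
  let nxt := st.1.2
  if PySem.List.pyGetD t i 0 = 1 then
    let r := chaseB nxt (nxt.size + 1) (PySem.List.pyGetD x i 0)
    let nxt' := r.1.foldl (fun d p => d.insert p r.2) nxt   -- path compression
    ((val.insert r.2 (PySem.List.pyGetD h_ i 0), nxt'.insert r.2 (r.2 + 1)), st.2)
  else
    (st.1, st.2 ++ [val.getD (PySem.List.pyGetD x i 0) (-1)])

def solve_alt (Q : Int) (t : List Int) (x : List Int) (h_ : List Int) : List Int :=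
  ((PySem.List.pyRange 0 Q 1).foldl (solveStepB t x h_)
    ((PySem.Dict.empty, PySem.Dict.empty), [])).2

-- ===== PRECONDITION & SPEC =====
-- Pre_ excludes (a) inputs on which A raises IndexError: a query index past a list's end,
-- a read index ≥ 2**20+1, or an insert whose forward scan could run off the array's end
-- (the closed-form bound x[i] + #inserts ≤ 2**20+1 is sufficient, slightly conservative);
-- (b) negative indices x[i], outside the problem's natural domain (A wraps around the
-- array's end there); (c) inserted values equal to -1, which collide with A's free-cell
-- sentinel so A silently re-frees the cell — an artefact of A's implementation.
def Pre_solve (Q : Int) (t : List Int) (x : List Int) (h_ : List Int) : Prop :=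
  Q ≤ (t.length : Int) ∧ Q ≤ (x.length : Int) ∧ Q ≤ (h_.length : Int) ∧
  ∀ i : Nat, i < Q.toNat →
    0 ≤ x.getD i 0 ∧
    (if t.getD i 0 = 1
      then x.getD i 0 + (((t.take Q.toNat).count 1 : Nat) : Int) ≤ 1048577 ∧ h_.getD i 0 ≠ -1
      else x.getD i 0 < 1048577)
instance (Q : Int) (t : List Int) (x : List Int) (h_ : List Int) : Decidable (Pre_solve Q t x h_) := by
  unfold Pre_solve; infer_instance

def pvWitness_solve : Int × List Int × List Int × List Int := (2, [1, 2], [5, 5], [7, 0])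

def Spec_solve (Q : Int) (t : List Int) (x : List Int) (h_ : List Int) (out : List Int) : Prop := out = solve_alt Q t x h_
instance (Q : Int) (t : List Int) (x : List Int) (h_ : List Int) (out : List Int) : Decidable (Spec_solve Q t x h_ out) := by unfold Spec_solve; infer_instance

-- ===== CLAIM (what is proved, stated in full; the proofs are below) =====
def Claim_equal_solve : Prop := ∀ (Q : Int) (t : List Int) (x : List Int) (h_ : List Int), Dom_solve Q t x h_ → Pre_solve Q t x h_ → Spec_solve Q t x h_ (solve Q t x h_)

-- ===== LEMMAS AND PROOFS =====

-- s is the first free cell at or after a (w.r.t. the dict of filled cells)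
def IsFF (val : PySem.Dict Int Int) (a s : Int) : Prop :=
  a ≤ s ∧ val.contains s = false ∧ ∀ k, a ≤ k → k < s → val.contains k = true

-- the simulation invariant between A's array and B's (val, nxt) dicts
structure SimInv (A : Array Int) (val nxt : PySem.Dict Int Int) : Prop where
  hsize : A.size = 1048577
  hagree : ∀ j : Nat, j < 1048577 → A[j]? = some (val.getD (j : Int) (-1))
  hval : ∀ k v, val.get? k = some v → v ≠ -1
  hdom : ∀ k, nxt.contains k = val.contains k
  hnxt : ∀ i j, nxt.get? i = some j → i < j ∧ ∀ k, i ≤ k → k < j → val.contains k = true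
  hvnd : val.keys.Nodup
  hnnd : nxt.keys.Nodup

theorem nodup_subset_length (l1 l2 : List Int) (h : l1.Nodup) (hs : l1 ⊆ l2) :
    l1.length ≤ l2.length := by
  calc l1.length = l1.toFinset.card := (List.toFinset_card_of_nodup h).symm
    _ ≤ l2.toFinset.card := Finset.card_le_card (fun a ha => by
        rw [List.mem_toFinset] at ha ⊢; exact hs ha)
    _ ≤ l2.length := l2.toFinset_card_le

theorem scan_eq (A : Array Int) (val nxt : PySem.Dict Int Int) (inv : SimInv A val nxt) :
    ∀ (fuel : Nat) (a s : Int), IsFF val a s → 0 ≤ a → s < 1048577 →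
      (s - a).toNat < fuel → solveScan A fuel a = s := by
  intro fuel
  induction fuel with
  | zero => intro a s _ _ _ hlt; exact absurd hlt (Nat.not_lt_zero _)
  | succ fuel ih =>
    intro a s hff ha hs hlt
    obtain ⟨has, hcs, hmin⟩ := hff
    have h1 : ¬ a < 0 := by omega
    have h2 : a.toNat < 1048577 := by omega
    have hcast : ((a.toNat : Nat) : Int) = a := by omega
    have hcell : pyAGet A a (-1) = val.getD a (-1) := by
      simp only [pyAGet, if_neg h1]
      rw [inv.hagree a.toNat h2, hcast]
      rfl
    by_cases he : a = s
    · subst he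
      have hd : val.getD a (-1) = -1 := PySem.Dict.getD_of_not_contains _ _ hcs
      simp only [solveScan, hcell, hd]
      simp
    · have hlt' : a < s := lt_of_le_of_ne has he
      have hc : val.contains a = true := hmin a le_rfl hlt'
      cases hv : val.get? a with
      | none =>
        rw [PySem.Dict.get?_eq_none_iff_contains] at hv
        rw [hc] at hv; exact absurd hv (by simp)
      | some v =>
        have hvne := inv.hval a v hv
        have hd : val.getD a (-1) = v := PySem.Dict.getD_of_get?_eq_some _ _ hv
        simp only [solveScan, hcell, hd, if_pos hvne]
        exact ih (a + 1) s ⟨by omega, hcs, fun k hk1 hk2 => hmin k (by omega) hk2⟩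
          (by omega) hs (by omega)

theorem filter_len_lt (l : List Int) (a j : Int) (hnd : l.Nodup) (ha : a ∈ l) (haj : a < j) :
    (l.filter (fun k => decide (j ≤ k))).length < (l.filter (fun k => decide (a ≤ k))).length := by
  rw [← List.countP_eq_length_filter, ← List.countP_eq_length_filter]
  induction l with
  | nil => cases ha
  | cons b l ih =>
    have hb := (List.nodup_cons.mp hnd).1
    have hnd' := (List.nodup_cons.mp hnd).2
    simp only [List.countP_cons]
    rcases List.mem_cons.mp ha with rfl | ha'
    · have hmono : List.countP (fun k => decide (j ≤ k)) l ≤ List.countP (fun k => decide (a ≤ k)) l :=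
        List.countP_mono_left (fun y _ hy => by
          simp only [decide_eq_true_eq] at hy ⊢; omega)
      have h1 : (decide (j ≤ a) : Bool) = false := by simp only [decide_eq_false_iff_not]; omega
      have h2 : (decide (a ≤ a) : Bool) = true := by simp
      rw [h1, h2]
      simp only [Bool.false_eq_true, if_false, if_true]
      omega
    · have := ih hnd' ha'
      have himp : (decide (j ≤ b) : Bool) = true → (decide (a ≤ b) : Bool) = true := by
        simp only [decide_eq_true_eq]; omega
      split_ifs with g1 g2 g2
      · omega
      · exact absurd (himp g1) g2
      · omega
      · omega

theorem chase_spec (val nxt : PySem.Dict Int Int)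
    (hdom : ∀ k, nxt.contains k = val.contains k)
    (hnxt : ∀ i j, nxt.get? i = some j → i < j ∧ ∀ k, i ≤ k → k < j → val.contains k = true)
    (hnnd : nxt.keys.Nodup) :
    ∀ (fuel : Nat) (a : Int), (nxt.keys.filter (fun k => decide (a ≤ k))).length < fuel →
      IsFF val a (chaseB nxt fuel a).2 ∧
      ∀ p ∈ (chaseB nxt fuel a).1, nxt.contains p = true ∧ p < (chaseB nxt fuel a).2 ∧
        ∀ k, p ≤ k → k < (chaseB nxt fuel a).2 → val.contains k = true := by
  intro fuel
  induction fuel with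
  | zero => intro a hlt; exact absurd hlt (Nat.not_lt_zero _)
  | succ fuel ih =>
    intro a hlt
    cases hg : nxt.get? a with
    | none =>
      have hca : nxt.contains a = false := (PySem.Dict.get?_eq_none_iff_contains _ _).mp hg
      simp only [chaseB, hg]
      refine ⟨⟨le_rfl, by rw [← hdom]; exact hca, fun k h1 h2 => by omega⟩, ?_⟩
      intro p hp; cases hp
    | some j =>
      obtain ⟨haj, hint⟩ := hnxt a j hg
      have hca : nxt.contains a = true := by
        rw [PySem.Dict.contains_eq_isSome_get?, hg]; rfl
      have hmem : a ∈ nxt.keys := (PySem.Dict.contains_iff_mem_keys _ _).mp hca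
      have hlt' : (nxt.keys.filter (fun k => decide (j ≤ k))).length < fuel := by
        have := filter_len_lt nxt.keys a j hnnd hmem haj
        omega
      obtain ⟨⟨hjs, hcs, hmin⟩, hpath⟩ := ih j hlt'
      have hall : ∀ k, a ≤ k → k < (chaseB nxt fuel j).2 → val.contains k = true := by
        intro k h1 h2
        by_cases hk : k < j
        · exact hint k h1 hk
        · exact hmin k (by omega) h2
      simp only [chaseB, hg]
      refine ⟨⟨by omega, hcs, hall⟩, ?_⟩
      intro p hp
      rcases List.mem_cons.mp hp with rfl | hp'
      · exact ⟨hca, by omega, hall⟩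
      · exact hpath p hp'

theorem ff_size_bound (val : PySem.Dict Int Int) (a s : Int)
    (hff : IsFF val a s) : s - a ≤ (val.size : Int) := by
  obtain ⟨has, hcs, hmin⟩ := hff
  have hsub : (PySem.List.pyRange a s) ⊆ val.keys := by
    intro k hk
    rw [PySem.List.mem_pyRange_one] at hk
    exact (PySem.Dict.contains_iff_mem_keys _ _).mp (hmin k hk.1 hk.2)
  have hlen := nodup_subset_length _ _ (PySem.List.nodup_pyRange_one a s) hsub
  rw [PySem.List.length_pyRange_one] at hlen
  have hks : val.keys.length = val.size := by
    simp [PySem.Dict.keys, PySem.Dict.size]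
  omega

theorem compress_spec (val : PySem.Dict Int Int) (f : Int) :
    ∀ (path : List Int) (nxt : PySem.Dict Int Int),
      (∀ i j, nxt.get? i = some j → i < j ∧ ∀ k, i ≤ k → k < j → val.contains k = true) →
      nxt.keys.Nodup →
      (∀ p ∈ path, nxt.contains p = true ∧ p < f ∧ ∀ k, p ≤ k → k < f → val.contains k = true) →
      (∀ k, (path.foldl (fun d p => d.insert p f) nxt).contains k = nxt.contains k) ∧
      (∀ i j, (path.foldl (fun d p => d.insert p f) nxt).get? i = some j →
        i < j ∧ ∀ k, i ≤ k → k < j → val.contains k = true) ∧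
      (path.foldl (fun d p => d.insert p f) nxt).keys.Nodup := by
  intro path
  induction path with
  | nil => intro nxt hnxt hnnd _; exact ⟨fun _ => rfl, hnxt, hnnd⟩
  | cons p path ih =>
    intro nxt hnxt hnnd hpath
    obtain ⟨hcp, hpf, hint⟩ := hpath p (by simp)
    simp only [List.foldl_cons]
    have h1 : ∀ k, (nxt.insert p f).contains k = nxt.contains k := by
      intro k
      rw [PySem.Dict.contains_insert]
      by_cases hk : k = p
      · subst hk; simp [hcp]
      · simp [hk]
    have h2 : ∀ i j, (nxt.insert p f).get? i = some j →
        i < j ∧ ∀ k, i ≤ k → k < j → val.contains k = true := by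
      intro i j hij
      rw [PySem.Dict.get?_insert] at hij
      split_ifs at hij with hi
      · subst hi
        have hjf : f = j := Option.some.inj hij
        subst hjf
        exact ⟨hpf, hint⟩
      · exact hnxt i j hij
    have h3 : (nxt.insert p f).keys.Nodup := PySem.Dict.nodup_keys_insert _ _ _ hnnd
    have h4 : ∀ q ∈ path, (nxt.insert p f).contains q = true ∧ q < f ∧
        ∀ k, q ≤ k → k < f → val.contains k = true := by
      intro q hq
      obtain ⟨hc, hlt2, hi2⟩ := hpath q (by simp [hq])
      exact ⟨by rw [h1]; exact hc, hlt2, hi2⟩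
    obtain ⟨g1, g2, g3⟩ := ih (nxt.insert p f) h2 h3 h4
    exact ⟨fun k => (g1 k).trans (h1 k), g2, g3⟩

theorem loop_sim (Q : Int) (t x h_ : List Int) (hpre : Pre_solve Q t x h_) :
    ∀ (k i : Nat), i + k = Q.toNat →
      ∀ (A : Array Int) (val nxt : PySem.Dict Int Int) (res : List Int),
        SimInv A val nxt → val.size = (t.take i).count 1 →
        ((PySem.List.pyRange (i : Int) Q 1).foldl (solveStepA t x h_) (A, res)).2 =
        ((PySem.List.pyRange (i : Int) Q 1).foldl (solveStepB t x h_) ((val, nxt), res)).2 := by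
  obtain ⟨hlt, hlx, hlh, hq⟩ := hpre
  intro k
  induction k with
  | zero =>
    intro i hi A val nxt res inv hsz
    rw [PySem.List.pyRange_one_eq_nil (by omega)]
    rfl
  | succ k ih =>
    intro i hi A val nxt res inv hsz
    have hiQ : (i : Int) < Q := by omega
    have hit : i < t.length := by omega
    have hcast : (((i + 1 : Nat)) : Int) = (i : Int) + 1 := by push_cast; ring
    rw [PySem.List.pyRange_one_cons hiQ]
    simp only [List.foldl_cons]
    obtain ⟨hx0, hcase⟩ := hq i (by omega)
    have e0 : t.take (i + 1) = t.take i ++ [t[i]] := by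
      rw [List.take_add_one, List.getElem?_eq_getElem hit]; rfl
    have e1 : (t.take (i + 1)).count 1 = (t.take i).count 1 + List.count 1 [t[i]] := by
      rw [e0, List.count_append]
    have hti : t[i] = t.getD i 0 := (List.getD_eq_getElem t 0 hit).symm
    by_cases ht1 : t.getD i 0 = 1
    · -- insert query
      obtain ⟨hbound, hhne⟩ : x.getD i 0 + (((t.take Q.toNat).count 1 : Nat) : Int) ≤ 1048577 ∧
          h_.getD i 0 ≠ -1 := by
        have hc := hcase; rw [if_pos ht1] at hc; exact hc
      have hflt : (nxt.keys.filter (fun k => decide (x.getD i 0 ≤ k))).length < nxt.size + 1 := by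
        have h1 := List.length_filter_le (fun k => decide (x.getD i 0 ≤ k)) nxt.keys
        have h2 : nxt.keys.length = nxt.size := by
          simp [PySem.Dict.keys, PySem.Dict.size]
        omega
      obtain ⟨hff, hpath⟩ := chase_spec val nxt inv.hdom inv.hnxt inv.hnnd (nxt.size + 1)
        (x.getD i 0) hflt
      set s := (chaseB nxt (nxt.size + 1) (x.getD i 0)).2 with hsdef
      obtain ⟨has, hcs, hmin⟩ := hff
      -- the number of filled cells so far is < the total number of inserts
      have hcle : (t.take (i + 1)).count 1 ≤ (t.take Q.toNat).count 1 := by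
        have hsub : (t.take (i + 1)).Sublist (t.take Q.toNat) := by
          have := List.take_sublist (i + 1) (t.take Q.toNat)
          rwa [List.take_take, Nat.min_eq_left (by omega)] at this
        exact hsub.count_le 1
      have hcnt1 : List.count 1 [t[i]] = 1 := by
        rw [hti, ht1]; simp
      have hsize_b := ff_size_bound val (x.getD i 0) s ⟨has, hcs, hmin⟩
      have hvsz : (val.size : Int) = ((t.take i).count 1 : Int) := by exact_mod_cast hsz
      have hsN : s < 1048577 := by omega
      have hs0 : 0 ≤ s := by omega
      have hscan : solveScan A A.size (x.getD i 0) = s := by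
        apply scan_eq A val nxt inv A.size (x.getD i 0) s ⟨has, hcs, hmin⟩ hx0 hsN
        rw [inv.hsize]; omega
      obtain ⟨g1, g2, g3⟩ := compress_spec val s
        ((chaseB nxt (nxt.size + 1) (x.getD i 0)).1) nxt inv.hnxt inv.hnnd hpath
      -- the step on each side
      simp only [solveStepA, solveStepB, PySem.List.pyGetD_natCast, ht1, if_true, ← hsdef]
      rw [hscan]
      -- invariant after the insert
      have hinv' : SimInv (pyASet A s (h_.getD i 0)) (val.insert s (h_.getD i 0))
          ((((chaseB nxt (nxt.size + 1) (x.getD i 0)).1).foldl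
              (fun d p => d.insert p s) nxt).insert s (s + 1)) := by
        constructor
        · simp only [pyASet, if_neg (by omega : ¬ s < 0)]
          rw [Array.size_setIfInBounds, inv.hsize]
        · intro j hj
          have hsetj : (pyASet A s (h_.getD i 0))[j]? =
              if s.toNat = j then some (h_.getD i 0) else A[j]? := by
            simp only [pyASet, if_neg (by omega : ¬ s < 0)]
            rw [Array.getElem?_setIfInBounds]
            by_cases he : s.toNat = j
            · rw [if_pos he, if_pos he, if_pos (by rw [inv.hsize]; omega)]
            · rw [if_neg he, if_neg he]
          rw [hsetj, PySem.Dict.getD_insert]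
          by_cases he : ((j : Int)) = s
          · rw [if_pos (by omega), if_pos he]
          · rw [if_neg (by omega), if_neg he, inv.hagree j hj]
        · intro kk v hkv
          rw [PySem.Dict.get?_insert] at hkv
          split_ifs at hkv with hk
          · have := Option.some.inj hkv; omega
          · exact inv.hval kk v hkv
        · intro kk
          rw [PySem.Dict.contains_insert, PySem.Dict.contains_insert, g1 kk, inv.hdom]
        · intro i2 j2 hij
          rw [PySem.Dict.get?_insert] at hij
          split_ifs at hij with hi2
          · have hj2 : j2 = s + 1 := (Option.some.inj hij).symm
            subst hi2 hj2
            refine ⟨by omega, fun k hk1 hk2 => ?_⟩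
            rw [PySem.Dict.contains_insert]
            have : k = s := by omega
            simp [this]
          · obtain ⟨hlt2, hint2⟩ := g2 i2 j2 hij
            refine ⟨hlt2, fun k hk1 hk2 => ?_⟩
            rw [PySem.Dict.contains_insert, hint2 k hk1 hk2]
            simp
        · exact PySem.Dict.nodup_keys_insert _ _ _ inv.hvnd
        · exact PySem.Dict.nodup_keys_insert _ _ _ g3
      have hsz' : (val.insert s (h_.getD i 0)).size = (t.take (i + 1)).count 1 := by
        rw [PySem.Dict.size_insert, hcs]
        simp only [Bool.false_eq_true, if_false]
        omega
      have H := ih (i + 1) (by omega) (pyASet A s (h_.getD i 0))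
        (val.insert s (h_.getD i 0))
        ((((chaseB nxt (nxt.size + 1) (x.getD i 0)).1).foldl
            (fun d p => d.insert p s) nxt).insert s (s + 1)) res hinv' hsz'
      rw [hcast] at H
      exact H
    · -- read query
      have hxi2 : x.getD i 0 < 1048577 := by
        have hc := hcase; rw [if_neg ht1] at hc; exact hc
      have hread : pyAGet A (x.getD i 0) 0 = val.getD (x.getD i 0) (-1) := by
        simp only [pyAGet, if_neg (by omega : ¬ x.getD i 0 < 0)]
        rw [inv.hagree (x.getD i 0).toNat (by omega),
          show (((x.getD i 0).toNat : Nat) : Int) = x.getD i 0 by omega]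
        rfl
      have hcnt0 : List.count 1 [t[i]] = 0 := by
        rw [List.count_eq_zero]
        intro hmem
        exact (by rw [hti]; exact ht1 : t[i] ≠ 1) (List.mem_singleton.mp hmem).symm
      have hsz' : val.size = (t.take (i + 1)).count 1 := by omega
      simp only [solveStepA, solveStepB, PySem.List.pyGetD_natCast, if_neg ht1]
      rw [hread]
      have H := ih (i + 1) (by omega) A val nxt (res ++ [val.getD (x.getD i 0) (-1)]) inv hsz'
      rw [hcast] at H
      exact H

-- ===== VERDICT (by name: the statement is the Claim_ definition above) =====
theorem solve_spec : Claim_equal_solve := by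
  intro Q t x h_ _hdom hpre
  unfold Spec_solve solve solve_alt
  have inv0 : SimInv (Array.replicate 1048577 (-1)) PySem.Dict.empty PySem.Dict.empty := by
    constructor
    · simp
    · intro j hj; simp [hj, PySem.Dict.getD_empty]
    · intro k v hkv; simp [PySem.Dict.get?_empty] at hkv
    · intro k; rfl
    · intro i j hij; simp [PySem.Dict.get?_empty] at hij
    · simp [PySem.Dict.keys_empty]
    · simp [PySem.Dict.keys_empty]
  have hsz : (PySem.Dict.empty : PySem.Dict Int Int).size = (t.take 0).count 1 := by
    simp [PySem.Dict.size_empty]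
  have h := loop_sim Q t x h_ hpre Q.toNat 0 (by omega)
    (Array.replicate 1048577 (-1)) PySem.Dict.empty PySem.Dict.empty [] inv0 hsz
  simpa using h
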